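-- pv_equiv track=rewrite | github.com/erickummelstedt/ubiquitinformatics | back_end/src/all_atom/later_development/labeling_backbones.py | check_atoms_on_nitro
-- ===== SOURCE A (Python) =====
-- def check_atoms_on_nitro(input_atom_types, aa_position = 'individual'):
--
--     ## should probably test this lol
--     ## second half of all of this is proline....things with two c.3
--     if aa_position == 'individual':
--         desired_atom_types_list= [['C.3', 'H', 'H'], ['C.3', 'H', 'H', 'H'], ['C.3', 'C.3', 'H'], ['C.3', 'C.3', 'H', 'H']] ## create for loop
--     elif aa_position  == 'n_terminus':
--         desired_atom_types_list= [['C.3', 'H', 'H'], ['C.3', 'H', 'H', 'H'], ['C.3', 'C.3', 'H'], ['C.3', 'C.3', 'H', 'H']] ## create for loop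
--     ## when the nitrogen is bonded it doesn't have the extra hydrogen
--     elif aa_position  == 'c_terminus':
--         desired_atom_types_list= [['C.3', 'C.2', 'H'], ['C.3', 'C.3', 'C.2']]  ## create for loop
--     elif aa_position  == 'double_bonded_peptide':
--         desired_atom_types_list= [['C.3', 'C.2', 'H'], ['C.3', 'C.3', 'C.2']]  ## create for loop
--
--     for desired_atom_types in desired_atom_types_list:
--         input_copy = input_atom_types.copy()
--         desired_copy = desired_atom_types.copy()
--         ## check len of both lists is the same
--         if len(desired_atom_types) == len(input_atom_types):
--             for i in desired_atom_types:
--                 removable_atom = desired_copy.pop()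
--                 if removable_atom in input_copy:
--                     input_copy.remove(removable_atom)
--         else:
--             outcome = False
--
--         if input_copy == [] and input_atom_types != []:
--             outcome = True
--             break
--         else:
--             outcome = False
--     return outcome == True
-- ===== SOURCE B (Python) =====
-- def check_atoms_on_nitro(input_atom_types, aa_position='individual'):
--     if aa_position == 'individual':
--         patterns = [['C.3', 'H', 'H'], ['C.3', 'H', 'H', 'H'], ['C.3', 'C.3', 'H'], ['C.3', 'C.3', 'H', 'H']]
--     elif aa_position == 'n_terminus':
--         patterns = [['C.3', 'H', 'H'], ['C.3', 'H', 'H', 'H'], ['C.3', 'C.3', 'H'], ['C.3', 'C.3', 'H', 'H']]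
--     elif aa_position == 'c_terminus':
--         patterns = [['C.3', 'C.2', 'H'], ['C.3', 'C.3', 'C.2']]
--     elif aa_position == 'double_bonded_peptide':
--         patterns = [['C.3', 'C.2', 'H'], ['C.3', 'C.3', 'C.2']]
--     key = sorted(input_atom_types)
--     return any(key == sorted(p) for p in patterns)
-- ===== Notes on version B (the rewrite author's own statement) =====
-- stated objective: simpler
-- what changed: Replaced the copy/pop/remove destructive multiset check with a single sorted-key comparison: sort the input once and test equality against each sorted pattern via any(); the redundant non-empty guard and the outcome flag disappear.
import Mathlib
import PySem

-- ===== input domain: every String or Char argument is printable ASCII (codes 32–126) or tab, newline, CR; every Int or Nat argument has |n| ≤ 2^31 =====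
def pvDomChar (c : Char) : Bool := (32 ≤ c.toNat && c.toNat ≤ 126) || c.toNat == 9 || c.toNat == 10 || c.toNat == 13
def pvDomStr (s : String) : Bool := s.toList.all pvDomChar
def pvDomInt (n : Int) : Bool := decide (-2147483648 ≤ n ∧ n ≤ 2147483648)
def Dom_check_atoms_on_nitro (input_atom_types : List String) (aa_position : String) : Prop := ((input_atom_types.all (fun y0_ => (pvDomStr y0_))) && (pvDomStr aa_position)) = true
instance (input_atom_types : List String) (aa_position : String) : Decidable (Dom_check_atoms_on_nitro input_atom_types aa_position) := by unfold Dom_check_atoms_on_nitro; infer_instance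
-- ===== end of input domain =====

-- B replaces A's destructive copy/pop/remove multiset check by sorting the input once and
-- comparing it with each sorted pattern (objective: simpler; return value only, A mutates no argument).

-- ===== PORT A =====
-- inner loop 'for i in desired_atom_types: removable_atom = desired_copy.pop(); if removable_atom in input_copy: input_copy.remove(removable_atom)'
-- state = (desired_copy, input_copy)
def nitroInner : List String → List String → List String → List String × List String
  | [], dc, ic => (dc, ic)
  | _ :: rest, dc, ic =>
    match PySem.List.pop? dc (-1) with
    | none => (dc, ic)            -- Python would raise IndexError; unreachable (dc starts as the list being iterated)
    | some (removable_atom, dc') =>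
      nitroInner rest dc'
        (if ic.contains removable_atom then (PySem.List.remove? ic removable_atom).getD ic else ic)

-- outer 'for desired_atom_types in desired_atom_types_list' with the break / outcome flag
def nitroLoop (input_atom_types : List String) : List (List String) → Bool
  | [] => false                    -- loop finished without break: outcome was set to False in the last iteration
  | desired :: rest =>
    let input_copy := input_atom_types
    let ic := if desired.length == input_atom_types.length
              then (nitroInner desired desired input_copy).2
              else input_copy
    if ic == [] && !(input_atom_types == []) then true
    else nitroLoop input_atom_types rest

def check_atoms_on_nitro (input_atom_types : List String) (aa_position : String) : Bool :=
  let desired_atom_types_list : List (List String) :=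
    if aa_position == "individual" then
      [["C.3","H","H"], ["C.3","H","H","H"], ["C.3","C.3","H"], ["C.3","C.3","H","H"]]
    else if aa_position == "n_terminus" then
      [["C.3","H","H"], ["C.3","H","H","H"], ["C.3","C.3","H"], ["C.3","C.3","H","H"]]
    else if aa_position == "c_terminus" then
      [["C.3","C.2","H"], ["C.3","C.3","C.2"]]
    else if aa_position == "double_bonded_peptide" then
      [["C.3","C.2","H"], ["C.3","C.3","C.2"]]
    else []                        -- Python: UnboundLocalError; excluded by Pre_
  nitroLoop input_atom_types desired_atom_types_list

-- ===== PORT B =====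
def check_atoms_on_nitro_alt (input_atom_types : List String) (aa_position : String) : Bool :=
  let patterns : List (List String) :=
    if aa_position == "individual" then
      [["C.3","H","H"], ["C.3","H","H","H"], ["C.3","C.3","H"], ["C.3","C.3","H","H"]]
    else if aa_position == "n_terminus" then
      [["C.3","H","H"], ["C.3","H","H","H"], ["C.3","C.3","H"], ["C.3","C.3","H","H"]]
    else if aa_position == "c_terminus" then
      [["C.3","C.2","H"], ["C.3","C.3","C.2"]]
    else if aa_position == "double_bonded_peptide" then
      [["C.3","C.2","H"], ["C.3","C.3","C.2"]]
    else []                        -- Python: NameError; excluded by Pre_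
  let key := PySem.List.sorted input_atom_types (fun x => x) false
  patterns.any (fun p => key == PySem.List.sorted p (fun x => x) false)

-- ===== PRECONDITION & SPEC =====
-- Pre_ excludes exactly the aa_position values outside the if/elif chain, on which Python A
-- raises UnboundLocalError (and Python B raises NameError).
def Pre_check_atoms_on_nitro (input_atom_types : List String) (aa_position : String) : Prop :=
  aa_position = "individual" ∨ aa_position = "n_terminus" ∨
  aa_position = "c_terminus" ∨ aa_position = "double_bonded_peptide"
instance (input_atom_types : List String) (aa_position : String) : Decidable (Pre_check_atoms_on_nitro input_atom_types aa_position) := by unfold Pre_check_atoms_on_nitro; infer_instance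

def pvWitness_check_atoms_on_nitro : List String × String := (["C.3", "H", "H"], "individual")

def Spec_check_atoms_on_nitro (input_atom_types : List String) (aa_position : String) (out : Bool) : Prop := out = check_atoms_on_nitro_alt input_atom_types aa_position
instance (input_atom_types : List String) (aa_position : String) (out : Bool) : Decidable (Spec_check_atoms_on_nitro input_atom_types aa_position out) := by unfold Spec_check_atoms_on_nitro; infer_instance

-- ===== CLAIM (what is proved, stated in full; the proofs are below) =====
def Claim_equal_check_atoms_on_nitro : Prop := ∀ (input_atom_types : List String) (aa_position : String), Dom_check_atoms_on_nitro input_atom_types aa_position → Pre_check_atoms_on_nitro input_atom_types aa_position → Spec_check_atoms_on_nitro input_atom_types aa_position (check_atoms_on_nitro input_atom_types aa_position)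

-- ===== LEMMAS AND PROOFS =====

-- one removal step of A's inner loop is List.erase
theorem nitro_step_eq_erase (ic : List String) (r : String) :
    (if ic.contains r then (PySem.List.remove? ic r).getD ic else ic) = ic.erase r := by
  by_cases h : r ∈ ic
  · simp [h, PySem.List.remove?_eq_some_erase ic r h]
  · simp [h, List.erase_of_not_mem h]

-- the inner loop removes the elements of dc back-to-front: input_copy becomes ic.diff dc.reverse
theorem nitroInner_snd (xs : List String) : ∀ (dc ic : List String), xs.length = dc.length →
    (nitroInner xs dc ic).2 = ic.diff dc.reverse := by
  induction xs with
  | nil => intro dc ic h; cases dc with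
    | nil => simp [nitroInner]
    | cons a t => simp at h
  | cons x rest ih =>
    intro dc ic h
    rcases List.eq_nil_or_concat dc with rfl | ⟨ys, y, rfl⟩
    · simp at h
    · simp only [List.concat_eq_append] at h ⊢
      have hlen : rest.length = ys.length := by
        simp at h; omega
      simp only [nitroInner, PySem.List.pop?_last ys y, nitro_step_eq_erase]
      rw [ih ys _ hlen, List.reverse_append]
      simp [List.diff_cons]

-- multiset difference empty + equal lengths characterises permutation
theorem diff_nil_iff_perm (l₁ l₂ : List String) (h : l₁.length = l₂.length) :
    l₁.diff l₂ = [] ↔ l₁.Perm l₂ := by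
  constructor
  · intro hd
    have hle : ∀ a, l₁.count a ≤ l₂.count a := by
      intro a
      have hc := List.count_diff a l₁ l₂
      rw [hd] at hc
      simp at hc
      omega
    exact (List.subperm_iff_count.mpr hle).perm_of_length_le (le_of_eq h.symm)
  · intro hp
    apply List.eq_nil_iff_forall_not_mem.mpr
    intro a ha
    have hc := List.count_diff a l₁ l₂
    rw [hp.count_eq] at hc
    simp at hc
    rw [List.count_eq_zero] at hc
    exact hc ha

-- one outer-loop iteration of A decides exactly 'sorted input == sorted d'
theorem nitro_pattern_case (d inp : List String) (hd : d ≠ []) :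
    (((if d.length == inp.length then (nitroInner d d inp).2 else inp) == []) && !(inp == []))
      = ((PySem.List.sorted inp (fun x => x) false) == PySem.List.sorted d (fun x => x) false) := by
  by_cases hlen : d.length = inp.length
  · rw [if_pos (by simpa using hlen), nitroInner_snd d d inp rfl]
    have hlen' : inp.length = d.reverse.length := by simp [hlen]
    have hinp : (inp == []) = false := by
      rw [beq_eq_false_iff_ne]
      intro h
      subst h
      simp at hlen
      exact hd hlen
    rw [hinp]
    by_cases hdiff : inp.diff d.reverse = []
    · have hperm : inp.Perm d :=
        ((diff_nil_iff_perm inp d.reverse hlen').mp hdiff).trans (List.reverse_perm d)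
      have hs := (PySem.List.sorted_id_eq_sorted_id_iff_perm inp d).mpr hperm
      simp [hdiff, hs]
    · have hnp : ¬ inp.Perm d := fun hp =>
        hdiff ((diff_nil_iff_perm inp d.reverse hlen').mpr (hp.trans (List.reverse_perm d).symm))
      have hs : ((PySem.List.sorted inp (fun x => x) false) == PySem.List.sorted d (fun x => x) false) = false := by
        rw [beq_eq_false_iff_ne]
        intro h
        exact hnp ((PySem.List.sorted_id_eq_sorted_id_iff_perm inp d).mp h)
      simp [hdiff, hs]
  · rw [if_neg (by simpa using hlen)]
    have hs : ((PySem.List.sorted inp (fun x => x) false) == PySem.List.sorted d (fun x => x) false) = false := by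
      rw [beq_eq_false_iff_ne]
      intro h
      exact hlen ((PySem.List.sorted_id_eq_sorted_id_iff_perm inp d).mp h).length_eq.symm
    rw [hs]
    simp

-- the whole outer loop is 'some pattern has the same sorted form'
theorem nitroLoop_eq_any (inp : List String) (P : List (List String)) (hP : ∀ d ∈ P, d ≠ []) :
    nitroLoop inp P
      = P.any (fun p => (PySem.List.sorted inp (fun x => x) false)
                          == PySem.List.sorted p (fun x => x) false) := by
  induction P with
  | nil => simp [nitroLoop]
  | cons d rest ih =>
    have hd : d ≠ [] := hP d (by simp)
    have hrest : ∀ x ∈ rest, x ≠ [] := fun x hx => hP x (by simp [hx])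
    rw [List.any_cons, ← ih hrest, ← nitro_pattern_case d inp hd]
    simp only [nitroLoop]
    by_cases hc : (((if d.length == inp.length then (nitroInner d d inp).2 else inp) == []) && !(inp == [])) = true
    · rw [if_pos hc, hc]
      simp
    · rw [if_neg hc]
      rw [Bool.not_eq_true] at hc
      rw [hc]
      simp

-- ===== VERDICT (by name: the statement is the Claim_ definition above) =====
theorem check_atoms_on_nitro_spec : Claim_equal_check_atoms_on_nitro := by
  intro inp pos _ hpre
  unfold Spec_check_atoms_on_nitro check_atoms_on_nitro check_atoms_on_nitro_alt
  rcases hpre with rfl | rfl | rfl | rfl <;>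
    simp only [String.reduceBEq, Bool.false_eq_true, if_false, if_true, beq_self_eq_true] <;>
    exact nitroLoop_eq_any inp _ (by decide)
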